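-- pv_equiv track=rewrite | github.com/Tonye-Onuoha/Freecodecamp-Projects | TIME_CALCULATOR.py | weekday
-- ===== SOURCE A (Python) =====
-- def weekday(number,optional):
--     """
--     This helper function will be used to return the day
--     of the week"""
--
--     day = optional.capitalize()
--     if number == 0:
--         return day
--     if number <= 7:
--         modulo = number
--     elif number > 7:
--         modulo = number%7
--
--
--
--
--     Sunday = ["Monday","Tuesday","Wednesday","Thursday","Friday","Saturday","Sunday"]
--     Monday = ["Tuesday","Wednesday","Thursday","Friday","Saturday","Sunday","Monday"]
--     Tuesday = ["Wednesday","Thursday","Friday","Saturday","Sunday","Monday","Tuesday"]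
--     Wednesday = ["Thursday","Friday","Saturday","Sunday","Monday","Tuesday","Wednesday"]
--     Thursday = ["Friday","Saturday","Sunday","Monday","Tuesday","Wednesday","Thursday"]
--     Friday = ["Saturday","Sunday","Monday","Tuesday","Wednesday","Thursday","Friday"]
--     Saturday = ["Sunday","Monday","Tuesday","Wednesday","Thursday","Friday","Saturday"]
--
--
--     if day == "Sunday":
--         count = 0
--         for i in Sunday:
--             count += 1
--             if count == modulo:
--                 return i
--
--
--     if day == "Monday":
--         count = 0
--         for i in Monday:
--             count += 1
--             if count == modulo:
--                 return i
--
--     if day == "Tuesday":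
--         count = 0
--         for i in Tuesday:
--             count += 1
--             if count == modulo:
--                 return i
--
--     if day == "Wednesday":
--         count = 0
--         for i in Wednesday:
--             count += 1
--             if count == modulo:
--                 return i
--
--     if day == "Thursday":
--         count = 0
--         for i in Thursday:
--             count += 1
--             if count == modulo:
--                 return i
--
--     if day == "Friday":
--         count = 0
--         for i in Friday:
--             count += 1
--             if count == modulo:
--                 return i
--
--     if day == "Saturday":
--         count = 0
--         for i in Saturday:
--             count += 1
--             if count == modulo:
--                 return i
-- ===== SOURCE B (Python) =====
-- def weekday(number, optional):
--     """Return the day of the week after adding the offset (modular index arithmetic)."""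
--     day = optional.capitalize()
--     if number == 0:
--         return day
--     days = ["Sunday", "Monday", "Tuesday", "Wednesday", "Thursday", "Friday", "Saturday"]
--     modulo = number if number <= 7 else number % 7
--     if day in days and 1 <= modulo <= 7:
--         return days[(days.index(day) + modulo) % 7]
--     return None
-- ===== Notes on version B (the rewrite author's own statement) =====
-- stated objective: simpler
-- what changed: Replaces the seven hand-written rotated lists each scanned linearly with a counter by a single ordered day list and one modular index computation days[(days.index(day)+modulo)%7].
import Mathlib
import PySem

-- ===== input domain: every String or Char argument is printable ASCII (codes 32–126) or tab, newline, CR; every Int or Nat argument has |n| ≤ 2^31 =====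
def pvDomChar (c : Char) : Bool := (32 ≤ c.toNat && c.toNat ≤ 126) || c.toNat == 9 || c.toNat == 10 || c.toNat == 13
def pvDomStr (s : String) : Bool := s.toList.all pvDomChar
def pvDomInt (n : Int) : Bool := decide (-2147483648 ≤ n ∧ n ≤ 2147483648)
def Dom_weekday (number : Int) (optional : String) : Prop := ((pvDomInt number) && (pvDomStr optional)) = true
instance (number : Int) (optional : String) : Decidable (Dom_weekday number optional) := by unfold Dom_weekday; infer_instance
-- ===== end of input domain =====

-- B replaces A's seven rotated literal lists (each scanned with a counter) by one ordered
-- list and a single modular index computation; objective: simpler.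

-- shared helper: Python's str.capitalize (exact on the ASCII domain): first char upper, rest lower
def pyCapitalize (s : String) : String :=
  match s.toList with
  | [] => ""
  | c :: rest => String.ofList (PySem.Chars.upperChar c :: rest.map PySem.Chars.lowerChar)

-- ===== PORT A =====
-- A's per-day loop: count starts at 0, increments, returns the element where count == modulo
def scanA (l : List String) (count : Int) (modulo : Int) : Option String :=
  match l with
  | [] => none
  | i :: rest =>
    let count := count + 1
    if count = modulo then some i else scanA rest count modulo

def weekday (number : Int) (optional : String) : Option String :=
  let day := pyCapitalize optional
  if number = 0 then some day
  else
    let modulo := if number ≤ 7 then number else PySem.Int.mod number 7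
    if day = "Sunday" then
      scanA ["Monday","Tuesday","Wednesday","Thursday","Friday","Saturday","Sunday"] 0 modulo
    else if day = "Monday" then
      scanA ["Tuesday","Wednesday","Thursday","Friday","Saturday","Sunday","Monday"] 0 modulo
    else if day = "Tuesday" then
      scanA ["Wednesday","Thursday","Friday","Saturday","Sunday","Monday","Tuesday"] 0 modulo
    else if day = "Wednesday" then
      scanA ["Thursday","Friday","Saturday","Sunday","Monday","Tuesday","Wednesday"] 0 modulo
    else if day = "Thursday" then
      scanA ["Friday","Saturday","Sunday","Monday","Tuesday","Wednesday","Thursday"] 0 modulo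
    else if day = "Friday" then
      scanA ["Saturday","Sunday","Monday","Tuesday","Wednesday","Thursday","Friday"] 0 modulo
    else if day = "Saturday" then
      scanA ["Sunday","Monday","Tuesday","Wednesday","Thursday","Friday","Saturday"] 0 modulo
    else none

-- ===== PORT B =====
def weekday_alt (number : Int) (optional : String) : Option String :=
  let day := pyCapitalize optional
  if number = 0 then some day
  else
    let days : List String := ["Sunday","Monday","Tuesday","Wednesday","Thursday","Friday","Saturday"]
    let modulo := if number ≤ 7 then number else PySem.Int.mod number 7
    if day ∈ days ∧ 1 ≤ modulo ∧ modulo ≤ 7 then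
      match PySem.List.index? days day with
      | some i => PySem.List.pyGet? days (PySem.Int.mod ((i : Int) + modulo) 7)
      | none => none
    else none

-- ===== PRECONDITION & SPEC =====
def Spec_weekday (number : Int) (optional : String) (out : Option String) : Prop := out = weekday_alt number optional
instance (number : Int) (optional : String) (out : Option String) : Decidable (Spec_weekday number optional out) := by unfold Spec_weekday; infer_instance

-- ===== CLAIM (what is proved, stated in full; the proofs are below) =====
def Claim_equal_weekday : Prop := ∀ (number : Int) (optional : String), Dom_weekday number optional → Spec_weekday number optional (weekday number optional)

-- ===== LEMMAS AND PROOFS =====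

-- a scan whose target is outside the counted window returns none
theorem scanA_none (l : List String) (c m : Int) (h : m ≤ c ∨ c + l.length < m) :
    scanA l c m = none := by
  induction l generalizing c with
  | nil => rfl
  | cons x xs ih =>
    simp only [scanA]
    rw [if_neg (by simp at h ⊢; omega)]
    exact ih (c + 1) (by simp at h ⊢; omega)

-- the inner computation of B, as a function of the capitalized day and modulo
def bodyB (day : String) (m : Int) : Option String :=
  let days : List String := ["Sunday","Monday","Tuesday","Wednesday","Thursday","Friday","Saturday"]
  if day ∈ days ∧ 1 ≤ m ∧ m ≤ 7 then
    match PySem.List.index? days day with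
    | some i => PySem.List.pyGet? days (PySem.Int.mod ((i : Int) + m) 7)
    | none => none
  else none

theorem body_eq (day : String) (m : Int) :
    (if day = "Sunday" then
      scanA ["Monday","Tuesday","Wednesday","Thursday","Friday","Saturday","Sunday"] 0 m
    else if day = "Monday" then
      scanA ["Tuesday","Wednesday","Thursday","Friday","Saturday","Sunday","Monday"] 0 m
    else if day = "Tuesday" then
      scanA ["Wednesday","Thursday","Friday","Saturday","Sunday","Monday","Tuesday"] 0 m
    else if day = "Wednesday" then
      scanA ["Thursday","Friday","Saturday","Sunday","Monday","Tuesday","Wednesday"] 0 m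
    else if day = "Thursday" then
      scanA ["Friday","Saturday","Sunday","Monday","Tuesday","Wednesday","Thursday"] 0 m
    else if day = "Friday" then
      scanA ["Saturday","Sunday","Monday","Tuesday","Wednesday","Thursday","Friday"] 0 m
    else if day = "Saturday" then
      scanA ["Sunday","Monday","Tuesday","Wednesday","Thursday","Friday","Saturday"] 0 m
    else none) = bodyB day m := by
  by_cases hout : m ≤ 0 ∨ 8 ≤ m
  · have hb : bodyB day m = none := by
      unfold bodyB
      rw [if_neg]; rintro ⟨-, h1, h2⟩; omega
    rw [hb]
    have hs : ∀ l : List String, l.length = 7 → scanA l 0 m = none := by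
      intro l hl
      exact scanA_none l 0 m (by omega)
    split_ifs <;> first | exact hs _ rfl | rfl
  · have hm : m = 1 ∨ m = 2 ∨ m = 3 ∨ m = 4 ∨ m = 5 ∨ m = 6 ∨ m = 7 := by omega
    have hdays : day ∈ (["Sunday","Monday","Tuesday","Wednesday","Thursday","Friday","Saturday"] : List String)
        ∨ day ∉ (["Sunday","Monday","Tuesday","Wednesday","Thursday","Friday","Saturday"] : List String) :=
      em _
    rcases hdays with hd | hd
    · fin_cases hd <;> rcases hm with h|h|h|h|h|h|h <;> subst h <;> decide
    · simp only [List.mem_cons, List.not_mem_nil, or_false, not_or] at hd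
      obtain ⟨h1, h2, h3, h4, h5, h6, h7⟩ := hd
      rw [if_neg h1, if_neg h2, if_neg h3, if_neg h4, if_neg h5, if_neg h6, if_neg h7]
      unfold bodyB
      rw [if_neg]
      simp only [List.mem_cons, List.not_mem_nil, or_false]
      rintro ⟨h, -⟩
      rcases h with h|h|h|h|h|h|h <;> [exact h1 h; exact h2 h; exact h3 h; exact h4 h; exact h5 h; exact h6 h; exact h7 h]

-- ===== VERDICT (by name: the statement is the Claim_ definition above) =====
theorem weekday_spec : Claim_equal_weekday := by
  intro number optional _
  unfold Spec_weekday weekday weekday_alt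
  by_cases h0 : number = 0
  · simp [h0]
  · simp only [if_neg h0]
    exact body_eq (pyCapitalize optional) _
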